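-- pv_equiv track=rewrite | github.com/Bolvis/4_klasa_SCI | Maturka Inf/4.py | goldbach
-- ===== SOURCE A (Python) =====
-- primeNums = [3, 5, 7, 11, 13, 17, 19, 23, 29, 31, 37, 41, 43, 47, 53, 59, 61, 67, 71, 73, 79, 83, 89, 97]
--
-- def goldbach(number):
--     prime_one = 0
--     prime_two = 0
--     for num_1 in primeNums:
--         for num_2 in primeNums:
--             if num_1 + num_2 == number and num_1 - num_2 <= prime_one + prime_two:
--                 prime_one = num_1
--                 prime_two = num_2
--     return prime_one, prime_two
-- ===== SOURCE B (Python) =====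
-- primeNums = [3, 5, 7, 11, 13, 17, 19, 23, 29, 31, 37, 41, 43, 47, 53, 59, 61, 67, 71, 73, 79, 83, 89, 97]
--
-- def goldbach(number):
--     prime_set = set(primeNums)
--     best = (0, 0)
--     for p in primeNums:
--         q = number - p
--         if q in prime_set:
--             best = (p, q)
--     return best
-- ===== Notes on version B (the rewrite author's own statement) =====
-- stated objective: simpler
-- what changed: Replaces the nested 24x24 scan with its odd tie-breaking inequality by a single ascending pass that records (p, number-p) whenever number-p is in a prime set, so later (larger-p) matches overwrite earlier ones.
import Mathlib
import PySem

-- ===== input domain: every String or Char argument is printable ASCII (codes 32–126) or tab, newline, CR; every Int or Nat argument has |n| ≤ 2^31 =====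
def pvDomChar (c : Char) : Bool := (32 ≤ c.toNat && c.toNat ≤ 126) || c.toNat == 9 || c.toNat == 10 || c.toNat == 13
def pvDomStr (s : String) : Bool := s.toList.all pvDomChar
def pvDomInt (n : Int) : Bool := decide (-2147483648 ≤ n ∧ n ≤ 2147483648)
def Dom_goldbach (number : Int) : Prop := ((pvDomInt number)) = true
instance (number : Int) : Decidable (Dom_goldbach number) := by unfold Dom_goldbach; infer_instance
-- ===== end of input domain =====

-- B replaces A's nested 24x24 scan (with its tie-breaking inequality) by a single
-- ascending pass with a set lookup, later matches overwriting earlier ones (objective: simpler).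

-- ===== PORT A =====
def primeNumsL : List Int :=
  [3, 5, 7, 11, 13, 17, 19, 23, 29, 31, 37, 41, 43, 47, 53, 59, 61, 67, 71, 73, 79, 83, 89, 97]

def goldbach (number : Int) : Int × Int :=
  primeNumsL.foldl (fun s num_1 =>
    primeNumsL.foldl (fun s num_2 =>
      if num_1 + num_2 = number ∧ num_1 - num_2 ≤ s.1 + s.2 then (num_1, num_2) else s) s)
    ((0 : Int), (0 : Int))

-- ===== PORT B =====
def goldbach_alt (number : Int) : Int × Int :=
  let primeSet : PySem.Set Int := PySem.Set.ofList primeNumsL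
  primeNumsL.foldl (fun best p =>
    if PySem.Set.contains primeSet (number - p) then (p, number - p) else best)
    ((0 : Int), (0 : Int))

-- ===== PRECONDITION & SPEC =====
def Spec_goldbach (number : Int) (out : Int × Int) : Prop := out = goldbach_alt number
instance (number : Int) (out : Int × Int) : Decidable (Spec_goldbach number out) := by unfold Spec_goldbach; infer_instance

-- ===== CLAIM (what is proved, stated in full; the proofs are below) =====
def Claim_equal_goldbach : Prop := ∀ (number : Int), Dom_goldbach number → Spec_goldbach number (goldbach number)

-- ===== LEMMAS AND PROOFS =====

theorem pv_foldl_id {α β : Type} (f : β → α → β) (l : List α) (b : β)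
    (h : ∀ b a, a ∈ l → f b a = b) : l.foldl f b = b := by
  induction l generalizing b with
  | nil => rfl
  | cons x xs ih =>
      simp only [List.foldl_cons]
      rw [h b x (by simp)]
      exact ih b (fun b a ha => h b a (by simp [ha]))

theorem pv_prime_bounds : ∀ x ∈ primeNumsL, 3 ≤ x ∧ x ≤ 97 := by decide

theorem pv_out_of_range (number : Int) (h : number < 6 ∨ 194 < number) :
    goldbach number = goldbach_alt number := by
  have hA : goldbach number = ((0 : Int), (0 : Int)) := by
    unfold goldbach
    apply pv_foldl_id
    intro s n1 h1
    apply pv_foldl_id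
    intro s' n2 h2
    rw [if_neg]
    rintro ⟨hsum, -⟩
    have b1 := pv_prime_bounds n1 h1
    have b2 := pv_prime_bounds n2 h2
    omega
  have hB : goldbach_alt number = ((0 : Int), (0 : Int)) := by
    unfold goldbach_alt
    apply pv_foldl_id
    intro s p hp
    rw [if_neg]
    intro hc
    have hmem : number - p ∈ PySem.Set.ofList primeNumsL := by
      simpa [PySem.Set.contains] using hc
    have hmem' : number - p ∈ primeNumsL := (PySem.Set.mem_ofList _ _).mp hmem
    have b1 := pv_prime_bounds p hp
    have b2 := pv_prime_bounds (number - p) hmem'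
    omega
  rw [hA, hB]

set_option maxRecDepth 8192 in
set_option maxHeartbeats 4000000 in
theorem pv_in_range :
    (List.range 189).all (fun k => goldbach (6 + (k : Int)) == goldbach_alt (6 + (k : Int))) = true := by
  decide

-- ===== VERDICT (by name: the statement is the Claim_ definition above) =====
theorem goldbach_spec : Claim_equal_goldbach := by
  intro number _
  unfold Spec_goldbach
  by_cases h : number < 6 ∨ 194 < number
  · exact pv_out_of_range number h
  · push Not at h
    obtain ⟨h1, h2⟩ := h
    obtain ⟨k, hk, rfl⟩ : ∃ k : Nat, k < 189 ∧ number = 6 + (k : Int) := by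
      refine ⟨(number - 6).toNat, by omega, by omega⟩
    have := List.all_eq_true.mp pv_in_range k (List.mem_range.mpr hk)
    exact eq_of_beq (by simpa using this)
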